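-- pv_equiv track=rewrite | github.com/VelupallyG/mas-sycophancy | src/metrics/trail.py | summarise_trail_counts
-- ===== SOURCE A (Python) =====
-- ERROR_CATEGORIES = frozenset(
--     {"reasoning_error", "planning_error", "system_execution_error"}
-- )
--
-- def summarise_trail_counts(
--     failure_categories: list[str],
-- ) -> dict[str, int]:
--     """Count failures by category across a set of agent-turns.
--
--     Args:
--         failure_categories: List of category strings from categorise_failure().
--
--     Returns:
--         Dict of {category: count} for all three error categories.
--     """
--     counts = {cat: 0 for cat in ERROR_CATEGORIES}
--     for cat in failure_categories:
--         if cat in counts: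
--             counts[cat] += 1
--     return counts
-- ===== SOURCE B (Python) =====
-- ERROR_CATEGORIES = frozenset(
--     {"reasoning_error", "planning_error", "system_execution_error"}
-- )
--
-- def summarise_trail_counts(failure_categories: list[str]) -> dict[str, int]:
--     """Sort-and-group: sort the relevant entries, run-length encode, tally runs."""
--     relevant = sorted(c for c in failure_categories if c in ERROR_CATEGORIES)
--     runs = []
--     for c in relevant:
--         if runs and runs[-1][0] == c:
--             runs[-1] = (c, runs[-1][1] + 1)
--         else:
--             runs.append((c, 1))
--     counts = {cat: 0 for cat in sorted(ERROR_CATEGORIES)}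
--     for v, k in runs:
--         counts[v] += k
--     return counts
-- ===== Notes on version B (the rewrite author's own statement) =====
-- stated objective: alternative
-- what changed: Replaces A's single accumulating membership-guarded tally pass with a sort-then-group algorithm: filter to the relevant categories, sort, run-length encode the sorted list, then sum the run lengths into the zero-initialised dict.
import Mathlib
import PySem

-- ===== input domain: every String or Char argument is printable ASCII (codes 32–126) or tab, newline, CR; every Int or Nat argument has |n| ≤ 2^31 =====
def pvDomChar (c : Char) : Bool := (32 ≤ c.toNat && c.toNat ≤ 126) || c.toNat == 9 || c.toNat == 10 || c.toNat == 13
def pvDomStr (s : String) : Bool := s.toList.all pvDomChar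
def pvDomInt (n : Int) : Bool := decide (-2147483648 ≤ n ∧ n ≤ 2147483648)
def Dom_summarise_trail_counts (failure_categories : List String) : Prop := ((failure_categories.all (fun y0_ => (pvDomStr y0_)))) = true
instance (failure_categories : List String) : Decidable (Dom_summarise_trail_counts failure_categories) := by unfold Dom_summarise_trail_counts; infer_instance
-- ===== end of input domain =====

-- B replaces A's single accumulating tally pass with a sort-then-group algorithm:
-- filter to the relevant categories, sort, run-length encode, sum run lengths (alternative).
-- ERROR_CATEGORIES is a frozenset; its Python iteration order is hash-dependent, and dict
-- outputs are compared ignoring key order, so A's port uses the sorted order, matching B.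

-- ===== PORT A =====
def pvErrorCategories : List String :=
  ["planning_error", "reasoning_error", "system_execution_error"]

def summarise_trail_counts (failure_categories : List String) : List (String × Int) :=
  -- counts = {cat: 0 for cat in ERROR_CATEGORIES}
  let counts : PySem.Dict String Int :=
    pvErrorCategories.foldl (fun d cat => d.insert cat 0) PySem.Dict.empty
  -- for cat in failure_categories: if cat in counts: counts[cat] += 1
  let counts :=
    failure_categories.foldl
      (fun d cat => if d.contains cat then d.modify cat 0 (· + 1) else d) counts
  counts.items

-- ===== PORT B =====
-- one step of B's run-length loop: `if runs and runs[-1][0] == c: runs[-1] = (c, runs[-1][1]+1) else: runs.append((c, 1))`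
def pvRunStep (runs : List (String × Int)) (c : String) : List (String × Int) :=
  match runs.getLast? with
  | some (v, k) => if v == c then runs.dropLast ++ [(c, k + 1)] else runs ++ [(c, 1)]
  | none => [(c, 1)]

def summarise_trail_counts_alt (failure_categories : List String) : List (String × Int) :=
  -- relevant = sorted(c for c in failure_categories if c in ERROR_CATEGORIES)
  let relevant := PySem.List.sorted
    (failure_categories.filter (fun c => pvErrorCategories.contains c)) (fun x => x)
  -- runs = []; for c in relevant: …   (run-length encode)
  let runs := relevant.foldl pvRunStep []
  -- counts = {cat: 0 for cat in sorted(ERROR_CATEGORIES)}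
  let counts : PySem.Dict String Int :=
    pvErrorCategories.foldl (fun d cat => d.insert cat 0) PySem.Dict.empty
  -- for v, k in runs: counts[v] += k   (v is always a present key, so modify is exact here)
  let counts := runs.foldl (fun d p => d.modify p.1 0 (· + p.2)) counts
  counts.items

-- ===== PRECONDITION & SPEC =====
def Spec_summarise_trail_counts (failure_categories : List String) (out : List (String × Int)) : Prop := out = summarise_trail_counts_alt failure_categories
instance (failure_categories : List String) (out : List (String × Int)) : Decidable (Spec_summarise_trail_counts failure_categories out) := by unfold Spec_summarise_trail_counts; infer_instance

-- ===== CLAIM (what is proved, stated in full; the proofs are below) =====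
def Claim_equal_summarise_trail_counts : Prop := ∀ (failure_categories : List String), Dom_summarise_trail_counts failure_categories → Spec_summarise_trail_counts failure_categories (summarise_trail_counts failure_categories)

-- ===== LEMMAS AND PROOFS =====

-- total run length recorded for a value c in a run list
def pvRunSum (runs : List (String × Int)) (c : String) : Int :=
  ((runs.filter (fun p => p.1 == c)).map (·.2)).sum

theorem pvRunSum_append (r s : List (String × Int)) (c : String) :
    pvRunSum (r ++ s) c = pvRunSum r c + pvRunSum s c := by
  simp [pvRunSum]

-- one step adds exactly one to the recorded total of the scanned element
theorem pvRunSum_step (runs : List (String × Int)) (x c : String) :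
    pvRunSum (pvRunStep runs x) c = pvRunSum runs c + (if x = c then 1 else 0) := by
  unfold pvRunStep
  cases hl : runs.getLast? with
  | none =>
      have : runs = [] := List.getLast?_eq_none_iff.mp hl
      subst this
      by_cases h : x = c <;> simp [pvRunSum, h]
  | some p =>
      obtain ⟨v, k⟩ := p
      have hne : runs ≠ [] := by
        intro h; subst h; simp at hl
      have hdecomp : runs.dropLast ++ [(v, k)] = runs := by
        have := List.dropLast_append_getLast hne
        rwa [(List.getLast?_eq_some_getLast hne).symm.trans hl |> Option.some.inj] at this
      by_cases hv : v = c
      · subst hv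
        by_cases hx : v = x
        · subst hx
          simp only [beq_self_eq_true, if_pos]
          rw [← hdecomp, pvRunSum_append, pvRunSum_append]
          simp [pvRunSum]
          ring
        · have hb : (v == x) = false := by simp [hx]
          simp only [hb, Bool.false_eq_true, if_false]
          rw [pvRunSum_append]
          have hxv : ¬ (x = v) := fun h => hx h.symm
          simp [pvRunSum, hxv]
      · by_cases hx : v = x
        · subst hx
          simp only [beq_self_eq_true, if_true]
          rw [← hdecomp, pvRunSum_append, pvRunSum_append]
          have hvc : ¬ (v = c) := hv
          simp [pvRunSum, hvc]
        · have hb : (v == x) = false := by simp [hx]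
          simp only [hb, Bool.false_eq_true, if_false]
          rw [pvRunSum_append]
          by_cases hxc : x = c <;> simp [pvRunSum, hxc]

-- the run-length fold records exactly the element counts
theorem pvRunSum_fold (xs : List String) (runs : List (String × Int)) (c : String) :
    pvRunSum (xs.foldl pvRunStep runs) c = pvRunSum runs c + xs.count c := by
  induction xs generalizing runs with
  | nil => simp
  | cons x t ih =>
      simp only [List.foldl_cons]
      rw [ih, pvRunSum_step]
      by_cases hx : x = c
      · subst hx; simp; ring
      · simp [hx]

-- every value in the run list came from the scanned list
theorem pv_run_fst_mem (xs : List String) (runs : List (String × Int))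
    (q : String × Int) (hq : q ∈ xs.foldl pvRunStep runs) :
    q.1 ∈ runs.map Prod.fst ∨ q.1 ∈ xs := by
  induction xs generalizing runs with
  | nil =>
      simp only [List.foldl_nil] at hq
      exact Or.inl (List.mem_map_of_mem hq)
  | cons x t ih =>
      simp only [List.foldl_cons] at hq
      rcases ih _ hq with h | h
      · unfold pvRunStep at h
        cases hl : runs.getLast? with
        | none => rw [hl] at h; simp at h; simp [h]
        | some p =>
            obtain ⟨v, k⟩ := p
            rw [hl] at h
            by_cases hv : (v == x) = true
            · simp only [hv, if_true] at h
              simp only [List.map_append, List.mem_append] at h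
              rcases h with h | h
              · exact Or.inl (List.map_subset _ (List.dropLast_subset runs) h)
              · simp at h; simp [h]
            · have hb : (v == x) = false := by simpa using hv
              simp only [hb, Bool.false_eq_true, if_false] at h
              simp only [List.map_append, List.mem_append] at h
              rcases h with h | h
              · exact Or.inl h
              · simp at h; simp [h]
      · simp [h]

-- the tally loop over runs keeps the key list when every run value is a present key
theorem pv_runs_fold_keys (runs : List (String × Int)) (d : PySem.Dict String Int)
    (h : ∀ p ∈ runs, d.contains p.1 = true) :
    (runs.foldl (fun d p => d.modify p.1 0 (· + p.2)) d).keys = d.keys := by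
  induction runs generalizing d with
  | nil => rfl
  | cons p t ih =>
      simp only [List.foldl_cons]
      rw [ih _ (by
        intro q hq
        rw [PySem.Dict.contains_modify]
        simp [h q (List.mem_cons_of_mem _ hq)]),
        PySem.Dict.keys_modify,
        PySem.Dict.keys_insert_of_contains _ _ (h p (List.mem_cons_self ..))]

theorem pv_runs_fold_getD (runs : List (String × Int)) (d : PySem.Dict String Int)
    (c : String) :
    (runs.foldl (fun d p => d.modify p.1 0 (· + p.2)) d).getD c 0
      = d.getD c 0 + pvRunSum runs c := by
  induction runs generalizing d with
  | nil => simp [pvRunSum]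
  | cons p t ih =>
      simp only [List.foldl_cons]
      rw [ih, PySem.Dict.getD_modify]
      by_cases hc : c = p.1
      · subst hc
        simp [pvRunSum]
        ring
      · rw [if_neg hc]
        have : ¬ (p.1 = c) := fun h => hc h.symm
        simp [pvRunSum, this]

-- A's loop does not change the key list.
theorem pv_fold_keys (fc : List String) (d : PySem.Dict String Int) :
    (fc.foldl (fun d cat => if d.contains cat then d.modify cat 0 (· + 1) else d) d).keys
      = d.keys := by
  induction fc generalizing d with
  | nil => rfl
  | cons x xs ih =>
      simp only [List.foldl_cons]
      by_cases h : d.contains x = true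
      · rw [if_pos h, ih, PySem.Dict.keys_modify,
            PySem.Dict.keys_insert_of_contains _ _ h]
      · rw [if_neg h, ih]

-- A's loop adds, to each key already present, the number of its occurrences in fc.
theorem pv_fold_getD (fc : List String) (d : PySem.Dict String Int) (c : String)
    (hc : d.contains c = true) :
    (fc.foldl (fun d cat => if d.contains cat then d.modify cat 0 (· + 1) else d) d).getD c 0
      = d.getD c 0 + fc.count c := by
  induction fc generalizing d with
  | nil => simp
  | cons x xs ih =>
      simp only [List.foldl_cons]
      by_cases h : d.contains x = true
      · rw [if_pos h, ih _ (by rw [PySem.Dict.contains_modify]; simp [hc])]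
        rw [PySem.Dict.getD_modify]
        by_cases hcx : c = x
        · subst hcx; simp; ring
        · rw [if_neg hcx]
          have hxc : ¬ (x = c) := fun h' => hcx h'.symm
          simp [hxc]
      · rw [if_neg h, ih _ hc]
        have hxc : ¬ (x = c) := by
          intro h'; subst h'; exact h hc
        simp [hxc]

-- ===== VERDICT (by name: the statement is the Claim_ definition above) =====
theorem summarise_trail_counts_spec : Claim_equal_summarise_trail_counts := by
  intro fc _
  unfold Spec_summarise_trail_counts summarise_trail_counts summarise_trail_counts_alt
  set d0 : PySem.Dict String Int :=
    pvErrorCategories.foldl (fun d cat => d.insert cat 0) PySem.Dict.empty with hd0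
  have hkeys0 : d0.keys = pvErrorCategories := by decide
  set relevant := PySem.List.sorted
    (fc.filter (fun c => pvErrorCategories.contains c)) (fun x => x) with hrel
  -- A side dict
  set dA := fc.foldl (fun d cat => if d.contains cat then d.modify cat 0 (· + 1) else d) d0
    with hdA
  -- B side dict
  set dB := (relevant.foldl pvRunStep []).foldl (fun d p => d.modify p.1 0 (· + p.2)) d0
    with hdB
  have hkA : dA.keys = pvErrorCategories := by rw [hdA, pv_fold_keys, hkeys0]
  have hkB : dB.keys = pvErrorCategories := by
    rw [hdB, pv_runs_fold_keys _ _ ?_, hkeys0]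
    intro q hq
    rcases pv_run_fst_mem relevant [] q hq with h | h
    · simp at h
    · rw [hrel, PySem.List.mem_sorted] at h
      have := List.of_mem_filter h
      rw [PySem.Dict.contains_eq_decide_mem_keys, hkeys0]
      simpa using this
  have hndA : dA.keys.Nodup := by rw [hkA]; decide
  have hndB : dB.keys.Nodup := by rw [hkB]; decide
  rw [PySem.Dict.items_eq_map_keys dA hndA 0, PySem.Dict.items_eq_map_keys dB hndB 0,
      hkA, hkB]
  apply List.map_congr_left
  intro c hcmem
  have hc : d0.contains c = true := by
    rw [PySem.Dict.contains_eq_decide_mem_keys, hkeys0]; simpa using hcmem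
  have hz : d0.getD c 0 = 0 := by fin_cases hcmem <;> decide
  have hA : dA.getD c 0 = (fc.count c : Int) := by
    rw [hdA, pv_fold_getD fc d0 c hc, hz]; ring
  have hB : dB.getD c 0 = (relevant.count c : Int) := by
    rw [hdB, pv_runs_fold_getD, hz, pvRunSum_fold]
    simp [pvRunSum]
  have hcnt : relevant.count c = fc.count c := by
    rw [hrel]
    rw [(PySem.List.sorted_perm _ _ _).count_eq]
    have hpc : pvErrorCategories.contains c = true := by simpa using hcmem
    rw [List.count_filter]
    simpa using hcmem
  simp [hA, hB, hcnt]
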